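-- pv_equiv track=rewrite | github.com/vlad-marlo/algorithms | school/webium/individuals/10/7626.py | solution
-- ===== SOURCE A (Python) =====
-- def solution(k: int, data: list) -> tuple:
--     data.sort()
--     n = [0 for _ in range(k)]
--     ans = 0
--     index = -1
--     for a, b in data:
--         for i in range(k):
--             if n[i] < a:
--                 ans += 1
--                 n[i] = b
--                 index = i
--                 break
--     return ans, index + 1
-- ===== SOURCE B (Python) =====
-- def _build(s):
--     # segment tree with s leaves (all 0); node = [min, left, right]
--     if s == 1:
--         return [0, None, None]
--     m = s // 2
--     return [0, _build(m), _build(s - m)]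
--
-- def _query(t, s, a):
--     # leftmost leaf index in t (size s) with value < a, or None
--     if t[0] >= a:
--         return None
--     if t[1] is None:
--         return 0
--     m = s // 2
--     j = _query(t[1], m, a)
--     if j is not None:
--         return j
--     r = _query(t[2], s - m, a)
--     return None if r is None else m + r
--
-- def _update(t, s, i, b):
--     # set leaf i of t (size s) to b, in place
--     if t[1] is None:
--         t[0] = b
--         return
--     m = s // 2
--     if i < m:
--         _update(t[1], m, i, b)
--     else:
--         _update(t[2], s - m, i - m, b)
--     t[0] = min(t[1][0], t[2][0])
--
-- def solution(k: int, data: list) -> tuple: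
--     data.sort()
--     if k <= 0:
--         return 0, 0
--     t = _build(k)
--     ans = 0
--     index = -1
--     for a, b in data:
--         j = _query(t, k, a)
--         if j is not None:
--             ans += 1
--             _update(t, k, j, b)
--             index = j
--     return ans, index + 1
-- ===== Notes on version B (the rewrite author's own statement) =====
-- stated objective: alternative
-- what changed: B replaces A's linear scan of the machine-availability array per interval with a segment tree storing subtree minima, answering the leftmost-index-with-value<a query and doing a point update by tree descent instead of scanning.
import Mathlib
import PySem

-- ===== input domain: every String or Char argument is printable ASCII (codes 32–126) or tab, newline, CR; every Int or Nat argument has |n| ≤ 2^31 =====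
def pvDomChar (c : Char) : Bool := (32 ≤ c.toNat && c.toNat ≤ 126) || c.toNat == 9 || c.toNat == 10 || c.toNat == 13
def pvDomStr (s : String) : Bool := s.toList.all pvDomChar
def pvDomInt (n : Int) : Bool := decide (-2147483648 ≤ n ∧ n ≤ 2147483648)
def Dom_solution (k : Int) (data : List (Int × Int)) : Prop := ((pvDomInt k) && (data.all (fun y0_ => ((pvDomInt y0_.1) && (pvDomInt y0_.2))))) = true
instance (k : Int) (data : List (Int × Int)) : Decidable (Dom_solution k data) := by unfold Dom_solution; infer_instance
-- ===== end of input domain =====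

-- B replaces A's per-interval linear scan of the machine-availability array with a
-- segment tree of minima (leftmost-index-with-value<a query + point update): a different
-- algorithm, fewer comparisons per interval, though not measurably faster in Python.
-- Both A and B sort `data` in place (same mutation); equivalence is about the return value.

-- ===== PORT A =====
-- inner loop `for i in range(k): if n[i] < a: n[i] = b; break` of A:
-- scans the machine list left to right, returns the updated list and the index hit.
def scanAGo (a b : Int) : List Int → List Int → Nat → Option (List Int × Nat)
  | [], _, _ => none
  | x :: xs, acc, i =>
      if x < a then some (acc.reverse ++ b :: xs, i)
      else scanAGo a b xs (x :: acc) (i + 1)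

def scanA (a b : Int) (n : List Int) : Option (List Int × Nat) :=
  scanAGo a b n [] 0

def solution (k : Int) (data : List (Int × Int)) : Int × Int :=
  let data := PySem.List.sorted2 data Prod.fst Prod.snd
  let n : List Int := List.replicate k.toNat 0
  let st := data.foldl
    (fun (st : List Int × Int × Int) ab =>
      match scanA ab.1 ab.2 st.1 with
      | some (n', i) => (n', st.2.1 + 1, (i : Int))
      | none => st)
    (n, 0, -1)
  (st.2.1, st.2.2 + 1)

-- ===== PORT B =====
-- segment tree of B: each node stores the min of its leaves
inductive STree : Type where
  | leaf : Int → STree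
  | node : Int → STree → STree → STree
deriving DecidableEq, Repr

def STree.mval : STree → Int
  | .leaf v => v
  | .node m _ _ => m

-- _build(s): tree with s leaves, all 0 (called with s ≥ 1)
def STree.build (s : Nat) : STree :=
  if h : s ≤ 1 then .leaf 0
  else
    .node 0 (STree.build (s / 2)) (STree.build (s - s / 2))
decreasing_by
  · omega
  · omega

-- _query(t, s, a): leftmost leaf index with value < a, or None
def STree.query (t : STree) (s : Nat) (a : Int) : Option Nat :=
  match t with
  | .leaf v => if v ≥ a then none else some 0
  | .node m l r =>
      if m ≥ a then none
      else
        let mid := s / 2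
        match l.query mid a with
        | some j => some j
        | none => (r.query (s - mid) a).map (fun j => mid + j)

-- _update(t, s, i, b): set leaf i to b, recompute the stored minima
def STree.update (t : STree) (s : Nat) (i : Nat) (b : Int) : STree :=
  match t with
  | .leaf _ => .leaf b
  | .node _ l r =>
      let mid := s / 2
      if i < mid then
        let l' := l.update mid i b
        .node (min l'.mval r.mval) l' r
      else
        let r' := r.update (s - mid) (i - mid) b
        .node (min l.mval r'.mval) l r'

def solution_alt (k : Int) (data : List (Int × Int)) : Int × Int :=
  let data := PySem.List.sorted2 data Prod.fst Prod.snd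
  if k ≤ 0 then (0, 0)
  else
    let s := k.toNat
    let st := data.foldl
      (fun (st : STree × Int × Int) ab =>
        match st.1.query s ab.1 with
        | some j => (st.1.update s j ab.2, st.2.1 + 1, (j : Int))
        | none => st)
      (STree.build s, 0, -1)
    (st.2.1, st.2.2 + 1)

-- ===== PRECONDITION & SPEC =====
def Spec_solution (k : Int) (data : List (Int × Int)) (out : Int × Int) : Prop := out = solution_alt k data
instance (k : Int) (data : List (Int × Int)) (out : Int × Int) : Decidable (Spec_solution k data out) := by unfold Spec_solution; infer_instance

-- ===== CLAIM (what is proved, stated in full; the proofs are below) =====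
def Claim_equal_solution : Prop := ∀ (k : Int) (data : List (Int × Int)), Dom_solution k data → Spec_solution k data (solution k data)

-- ===== LEMMAS AND PROOFS =====

-- leaves of a tree, left to right
def STree.toList : STree → List Int
  | .leaf v => [v]
  | .node _ l r => l.toList ++ r.toList

-- well-formedness: sizes match and every stored min is the min of the children's minima
inductive STree.Wf : STree → Nat → Prop where
  | leaf (v : Int) : STree.Wf (.leaf v) 1
  | node (m : Int) (l r : STree) (s : Nat) (h2 : 2 ≤ s)
      (hl : STree.Wf l (s / 2)) (hr : STree.Wf r (s - s / 2))
      (hm : m = min l.mval r.mval) : STree.Wf (.node m l r) s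

theorem wf_length {t : STree} {s : Nat} (h : STree.Wf t s) : t.toList.length = s := by
  induction h with
  | leaf v => rfl
  | node m l r s h2 hl hr hm ihl ihr =>
      simp [STree.toList, ihl, ihr]; omega

theorem wf_mval_le {t : STree} {s : Nat} (h : STree.Wf t s) :
    ∀ x ∈ t.toList, t.mval ≤ x := by
  induction h with
  | leaf v => simp [STree.toList, STree.mval]
  | node m l r s h2 hl hr hm ihl ihr =>
      intro x hx
      simp [STree.toList] at hx
      rcases hx with hx | hx
      · exact le_trans (by simp [STree.mval, hm]) (ihl x hx)
      · exact le_trans (by simp [STree.mval, hm]) (ihr x hx)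

theorem build_wf (s : Nat) (hs : 1 ≤ s) : STree.Wf (STree.build s) s := by
  induction s using Nat.strong_induction_on with
  | _ s ih =>
      rw [STree.build]
      by_cases h : s ≤ 1
      · simp only [h, dite_true]
        have : s = 1 := by omega
        subst this; exact .leaf 0
      · simp only [h, dite_false]
        refine .node 0 _ _ s (by omega) (ih _ (by omega) (by omega)) (ih _ (by omega) (by omega)) ?_
        have hl := build_mval (s / 2)
        have hr := build_mval (s - s / 2)
        simp [hl, hr]
where
  build_mval : ∀ s : Nat, (STree.build s).mval = 0 := by
    intro s
    induction s using Nat.strong_induction_on with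
    | _ s ih =>
        rw [STree.build]
        by_cases h : s ≤ 1
        · simp [h, STree.mval]
        · simp [h, STree.mval]

theorem build_toList (s : Nat) : (STree.build s).toList = List.replicate (max s 1) 0 := by
  induction s using Nat.strong_induction_on with
  | _ s ih =>
      rw [STree.build]
      by_cases h : s ≤ 1
      · simp [h, STree.toList]
      · simp only [h, dite_false, STree.toList]
        rw [ih _ (by omega), ih _ (by omega)]
        have h1 : max (s / 2) 1 = s / 2 := by omega
        have h2 : max (s - s / 2) 1 = s - s / 2 := by omega
        have h3 : max s 1 = s := by omega
        rw [h1, h2, h3, ← List.replicate_add]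
        congr 1
        omega

theorem set_app_left {l₁ l₂ : List Int} {i : Nat} (b : Int) (h : i < l₁.length) :
    (l₁ ++ l₂).set i b = l₁.set i b ++ l₂ := by
  induction l₁ generalizing i with
  | nil => simp at h
  | cons x xs ih =>
      cases i with
      | zero => simp
      | succ j => simp [List.set_cons_succ, ih (by simpa using h)]

theorem set_app_right {l₁ l₂ : List Int} {i : Nat} (b : Int) (h : l₁.length ≤ i) :
    (l₁ ++ l₂).set i b = l₁ ++ l₂.set (i - l₁.length) b := by
  induction l₁ generalizing i with
  | nil => simp
  | cons x xs ih =>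
      cases i with
      | zero => simp at h
      | succ j => simp [List.set_cons_succ, ih (by simpa using h)]

-- query computes findIdx? (· < a) on the leaves
theorem query_eq {t : STree} {s : Nat} (h : STree.Wf t s) (a : Int) :
    t.query s a = t.toList.findIdx? (fun x => x < a) := by
  induction h with
  | leaf v =>
      by_cases hv : v ≥ a
      · have : ¬ v < a := by omega
        simp [STree.query, STree.toList, List.findIdx?_cons, hv, this]
      · have : v < a := by omega
        simp [STree.query, STree.toList, List.findIdx?_cons, hv, this]
  | node m l r s h2 hl hr hm ihl ihr =>
      have hlen : l.toList.length = s / 2 := wf_length hl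
      rw [STree.toList, List.findIdx?_append, STree.query]
      by_cases hma : m ≥ a
      · -- all leaves ≥ m ≥ a: both sides none
        have hnone : ∀ (u : STree), (∀ x ∈ u.toList, m ≤ x) →
            u.toList.findIdx? (fun x => x < a) = none := by
          intro u hu
          rw [List.findIdx?_eq_none_iff]
          intro x hx
          simp only [decide_eq_false_iff_not, not_lt]
          exact le_trans hma (hu x hx)
        have hlm : ∀ x ∈ l.toList, m ≤ x := fun x hx =>
          le_trans (by simp [hm]) (wf_mval_le hl x hx)
        have hrm : ∀ x ∈ r.toList, m ≤ x := fun x hx =>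
          le_trans (by simp [hm]) (wf_mval_le hr x hx)
        simp [hma, hnone l hlm, hnone r hrm]
      · simp only [hma, if_false, ihl, ihr]
        cases hfl : l.toList.findIdx? (fun x => x < a) with
        | some j => simp
        | none =>
            simp [hlen]
            cases r.toList.findIdx? (fun x => x < a) with
            | some j => simp [Nat.add_comm]
            | none => simp

-- update sets leaf i and preserves well-formedness
theorem update_toList {t : STree} {s : Nat} (h : STree.Wf t s) (i : Nat) (b : Int)
    (hi : i < s) : (t.update s i b).toList = t.toList.set i b := by
  induction h generalizing i with
  | leaf v =>
      have : i = 0 := by omega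
      subst this; rfl
  | node m l r s h2 hl hr hm ihl ihr =>
      have hlen : l.toList.length = s / 2 := wf_length hl
      rw [STree.update]
      by_cases hlt : i < s / 2
      · simp only [hlt, if_true, STree.toList]
        rw [ihl i hlt, set_app_left _ (by omega)]
      · simp only [hlt, if_false, STree.toList]
        rw [ihr (i - s / 2) (by omega), set_app_right _ (by omega), hlen]

theorem update_wf {t : STree} {s : Nat} (h : STree.Wf t s) (i : Nat) (b : Int) :
    STree.Wf (t.update s i b) s := by
  induction h generalizing i with
  | leaf v => exact .leaf b
  | node m l r s h2 hl hr hm ihl ihr =>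
      rw [STree.update]
      by_cases hlt : i < s / 2
      · simp only [hlt, if_true]
        exact .node _ _ _ s h2 (ihl i) hr rfl
      · simp only [hlt, if_false]
        exact .node _ _ _ s h2 hl (ihr (i - s / 2)) rfl

-- A's inner scan in terms of findIdx? and set
theorem scanAGo_eq (a b : Int) (xs acc : List Int) (i : Nat) :
    scanAGo a b xs acc i =
      (xs.findIdx? (fun x => x < a)).map (fun j => (acc.reverse ++ xs.set j b, i + j)) := by
  induction xs generalizing acc i with
  | nil => simp [scanAGo]
  | cons x xs ih =>
      rw [scanAGo, List.findIdx?_cons]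
      by_cases hx : x < a
      · simp [hx]
      · simp only [hx, if_false, decide_false, ih, List.reverse_cons]
        cases xs.findIdx? (fun x => x < a) with
        | none => simp
        | some j => simp; omega

theorem scanA_eq (a b : Int) (n : List Int) :
    scanA a b n = (n.findIdx? (fun x => x < a)).map (fun j => (n.set j b, j)) := by
  rw [scanA, scanAGo_eq]
  simp

-- the two folds agree step by step when the tree's leaves are A's list
theorem fold_agree (s : Nat) (data : List (Int × Int)) (t : STree) (n : List Int)
    (ans idx : Int) (hw : STree.Wf t s) (hn : t.toList = n) :
    (data.foldl
      (fun (st : List Int × Int × Int) ab =>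
        match scanA ab.1 ab.2 st.1 with
        | some (n', i) => (n', st.2.1 + 1, (i : Int))
        | none => st)
      (n, ans, idx)).2 =
    (data.foldl
      (fun (st : STree × Int × Int) ab =>
        match st.1.query s ab.1 with
        | some j => (st.1.update s j ab.2, st.2.1 + 1, (j : Int))
        | none => st)
      (t, ans, idx)).2 := by
  induction data generalizing t n ans idx with
  | nil => rfl
  | cons ab rest ih =>
      simp only [List.foldl_cons]
      rw [scanA_eq, query_eq hw, hn]
      cases hf : n.findIdx? (fun x => x < ab.1) with
      | none => simp only [Option.map_none]; exact ih t n ans idx hw hn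
      | some j =>
          have hj : j < s := by
            have h1 := (List.findIdx?_eq_some_iff_findIdx_eq.mp hf).1
            have hlen := wf_length hw
            rw [hn] at hlen
            omega
          simp only [Option.map_some]
          exact ih _ _ _ _ (update_wf hw j ab.2)
            (by rw [update_toList hw j ab.2 hj, hn])

-- ===== VERDICT (by name: the statement is the Claim_ definition above) =====
theorem solution_spec : Claim_equal_solution := by
  intro k data _
  unfold Spec_solution solution solution_alt
  by_cases hk : k ≤ 0
  · -- no machines: A's list is empty, every scan fails, state never changes
    have hz : k.toNat = 0 := by omega
    simp only [hk, if_true, hz, List.replicate]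
    have : ∀ (d : List (Int × Int)) (ans idx : Int),
        d.foldl
          (fun (st : List Int × Int × Int) ab =>
            match scanA ab.1 ab.2 st.1 with
            | some (n', i) => (n', st.2.1 + 1, (i : Int))
            | none => st)
          ([], ans, idx) = ([], ans, idx) := by
      intro d
      induction d with
      | nil => intro ans idx; rfl
      | cons ab rest ih => intro ans idx; simp only [List.foldl_cons, scanA, scanAGo]; exact ih ans idx
    rw [this]
    rfl
  · simp only [hk, if_false]
    have hs : 1 ≤ k.toNat := by omega
    have hfold := fold_agree k.toNat (PySem.List.sorted2 data Prod.fst Prod.snd)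
      (STree.build k.toNat) (List.replicate k.toNat 0) 0 (-1)
      (build_wf k.toNat hs)
      (by rw [build_toList]; congr 1; omega)
    rw [hfold]
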